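-- pv_equiv track=rewrite | github.com/dheephiga/Jatayu-S3_techtanic | data_generator/fun.py | assign_same_id_for_name
-- ===== SOURCE A (Python) =====
-- def assign_same_id_for_name(program):
--     name_ids = {}
--     for entry in program:
--         if entry['type']=='AD':
--             name = entry['name']
--             if name in name_ids:
--                 entry['id'] = name_ids[name]
--             else:
--                 name_ids[name] = entry['id']
--     return program
-- ===== SOURCE B (Python) =====
-- # Two-pass version: build the complete name -> first-seen-id table, then rewrite ids.
-- # Like A it mutates the entry dicts in place and returns the same list object
-- # (it additionally re-assigns the first-seen entry's id to its own unchanged value).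
-- def assign_same_id_for_name(program):
--     name_ids = {}
--     for entry in program:
--         if entry['type'] == 'AD' and entry['name'] not in name_ids:
--             name_ids[entry['name']] = entry['id']
--     for entry in program:
--         if entry['type'] == 'AD':
--             entry['id'] = name_ids[entry['name']]
--     return program
-- ===== Notes on version B (the rewrite author's own statement) =====
-- stated objective: alternative
-- what changed: B builds the complete name-to-first-seen-id table in a first pass over the program and then rewrites every 'AD' entry's id from that table in a second pass, instead of A's single loop that interleaves building the table with overwriting ids.
import Mathlib
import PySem

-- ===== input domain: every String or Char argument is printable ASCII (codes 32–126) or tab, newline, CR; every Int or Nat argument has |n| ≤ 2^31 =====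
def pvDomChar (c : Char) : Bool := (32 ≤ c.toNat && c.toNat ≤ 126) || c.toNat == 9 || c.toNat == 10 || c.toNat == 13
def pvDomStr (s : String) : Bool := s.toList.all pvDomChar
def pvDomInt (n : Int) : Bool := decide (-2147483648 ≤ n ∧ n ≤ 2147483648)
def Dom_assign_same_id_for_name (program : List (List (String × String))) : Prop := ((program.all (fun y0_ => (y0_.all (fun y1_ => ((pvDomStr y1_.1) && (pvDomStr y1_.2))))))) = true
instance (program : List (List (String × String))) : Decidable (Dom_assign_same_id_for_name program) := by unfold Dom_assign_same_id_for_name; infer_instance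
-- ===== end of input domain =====

-- B is an alternative decomposition: it builds the full name→first-id table in a first pass and
-- rewrites the ids in a second pass, instead of interleaving build and overwrite in one loop.
-- Both Pythons mutate the entry dicts in place and return the same list (B additionally re-assigns
-- a first-seen entry's id to its own unchanged value); the equivalence proved is about the return value.

-- Shared helpers: exact Python dict semantics on the assoc-list representation of a dict with
-- distinct keys (read = first match, write = overwrite in place / append a new key).
def pvLookup : List (String × String) → String → Option String
  | [], _ => none
  | (k, v) :: rest, key => if k == key then some v else pvLookup rest key

-- total form of entry[k]; Pre_ guarantees the key is present wherever the Python reads it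
def pvGetD (e : List (String × String)) (k : String) : String := (pvLookup e k).getD ""

-- entry[k] = v  (overwrite first occurrence in place, else append)
def pvSet : List (String × String) → String → String → List (String × String)
  | [], k, v => [(k, v)]
  | (k', v') :: rest, k, v => if k' == k then (k, v) :: rest else (k', v') :: pvSet rest k v

-- ===== PORT A =====
-- the single loop of A, threading the name_ids dict
def pvAssignA (ids : List (String × String)) : List (List (String × String)) → List (List (String × String))
  | [] => []
  | e :: rest =>
    if pvGetD e "type" == "AD" then
      match pvLookup ids (pvGetD e "name") with
      | some v => pvSet e "id" v :: pvAssignA ids rest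
      | none => e :: pvAssignA (ids ++ [(pvGetD e "name", pvGetD e "id")]) rest
    else e :: pvAssignA ids rest

def assign_same_id_for_name (program : List (List (String × String))) : List (List (String × String)) :=
  pvAssignA [] program

-- ===== PORT B =====
-- first pass of B: record the first-seen id for every 'AD' name
def pvBuildTable (t : List (String × String)) : List (List (String × String)) → List (String × String)
  | [] => t
  | e :: rest =>
    if pvGetD e "type" == "AD" && (pvLookup t (pvGetD e "name")).isNone then
      pvBuildTable (t ++ [(pvGetD e "name", pvGetD e "id")]) rest
    else pvBuildTable t rest

-- second pass of B: rewrite every 'AD' entry's id from the table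
def pvApplyTable (t : List (String × String)) (program : List (List (String × String))) : List (List (String × String)) :=
  program.map (fun e => if pvGetD e "type" == "AD" then pvSet e "id" (pvGetD t (pvGetD e "name")) else e)

def assign_same_id_for_name_alt (program : List (List (String × String))) : List (List (String × String)) :=
  pvApplyTable (pvBuildTable [] program) program

-- ===== PRECONDITION & SPEC =====
-- Pre_ excludes exactly (a) inputs where the Python A raises a KeyError — an entry without 'type',
-- an 'AD' entry without 'name', or an 'AD' entry that is the first of its name but has no 'id' —
-- and (b) assoc lists with duplicate keys inside an entry, which do not represent a Python dict.
-- (Thanks to the nodup-keys clause, "entry['type'] == 'AD'" is the closed-form "(\"type\", \"AD\") ∈ e".)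
def Pre_assign_same_id_for_name (program : List (List (String × String))) : Prop :=
  (∀ e ∈ program, (e.map Prod.fst).Nodup ∧ "type" ∈ e.map Prod.fst ∧
      (("type", "AD") ∈ e → "name" ∈ e.map Prod.fst)) ∧
  (∀ i, (hi : i < program.length) → ("type", "AD") ∈ program[i] →
    ∀ p ∈ program[i], p.1 = "name" →
    (∀ j, (hj : j < program.length) → j < i →
      ¬(("type", "AD") ∈ program[j] ∧ ("name", p.2) ∈ program[j])) →
    "id" ∈ program[i].map Prod.fst)

instance (program : List (List (String × String))) : Decidable (Pre_assign_same_id_for_name program) := by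
  unfold Pre_assign_same_id_for_name; exact @instDecidableAnd _ _ inferInstance inferInstance

def pvWitness_assign_same_id_for_name : (List (List (String × String))) :=
  [[("type", "AD"), ("name", "x"), ("id", "1")],
   [("type", "XX"), ("name", "y")],
   [("type", "AD"), ("name", "x"), ("id", "7")]]

def Spec_assign_same_id_for_name (program : List (List (String × String))) (out : List (List (String × String))) : Prop := out = assign_same_id_for_name_alt program
instance (program : List (List (String × String))) (out : List (List (String × String))) : Decidable (Spec_assign_same_id_for_name program out) := by unfold Spec_assign_same_id_for_name; infer_instance

-- ===== CLAIM (what is proved, stated in full; the proofs are below) =====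
def Claim_equal_assign_same_id_for_name : Prop := ∀ (program : List (List (String × String))), Dom_assign_same_id_for_name program → Pre_assign_same_id_for_name program → Spec_assign_same_id_for_name program (assign_same_id_for_name program)

-- ===== LEMMAS AND PROOFS =====

def pvHasKey (e : List (String × String)) (k : String) : Bool := (pvLookup e k).isSome

-- loop invariant: every 'AD' entry that is the first of its name relative to ids (the name_ids seen so far) carries an 'id' key
def pvSeenInv (ids : List (String × String)) (l : List (List (String × String))) : Prop :=
  ∀ i, (hi : i < l.length) → pvGetD l[i] "type" = "AD" →
    pvLookup ids (pvGetD l[i] "name") = none →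
    (∀ j, (hj : j < l.length) → j < i →
      ¬(pvGetD l[j] "type" = "AD" ∧ pvGetD l[j] "name" = pvGetD l[i] "name")) →
    pvHasKey l[i] "id" = true


lemma pvLookup_append_some {t : List (String × String)} {k v : String}
    (t' : List (String × String)) (h : pvLookup t k = some v) :
    pvLookup (t ++ t') k = some v := by
  induction t with
  | nil => simp [pvLookup] at h
  | cons p rest ih =>
    obtain ⟨k', v'⟩ := p
    by_cases hk : (k' == k)
    · simp only [pvLookup, hk, if_true] at h ⊢
      simpa [pvLookup, hk] using h
    · simp [pvLookup, hk] at h ⊢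
      exact ih h

lemma pvLookup_append_single_self {t : List (String × String)} {k : String}
    (v : String) (h : pvLookup t k = none) :
    pvLookup (t ++ [(k, v)]) k = some v := by
  induction t with
  | nil => simp [pvLookup]
  | cons p rest ih =>
    obtain ⟨k', v'⟩ := p
    by_cases hk : (k' == k)
    · simp [pvLookup, hk] at h
    · simp [pvLookup, hk] at h ⊢
      exact ih h

lemma pvLookup_buildTable {t : List (String × String)} {k v : String}
    (l : List (List (String × String))) (h : pvLookup t k = some v) :
    pvLookup (pvBuildTable t l) k = some v := by
  induction l generalizing t with
  | nil => simpa [pvBuildTable] using h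
  | cons e rest ih =>
    simp only [pvBuildTable]
    split
    · exact ih (pvLookup_append_some _ h)
    · exact ih h

lemma pvSet_getD_self (e : List (String × String)) (k : String)
    (h : pvHasKey e k = true) : pvSet e k (pvGetD e k) = e := by
  induction e with
  | nil => simp [pvHasKey, pvLookup] at h
  | cons p rest ih =>
    obtain ⟨k', v'⟩ := p
    by_cases hk : (k' == k)
    · have : k' = k := by simpa using hk
      simp [pvSet, pvGetD, pvLookup, this]

    · have h' : pvHasKey rest k = true := by
        simpa [pvHasKey, pvLookup, hk] using h
      have hg : pvGetD ((k', v') :: rest) k = pvGetD rest k := by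
        simp [pvGetD, pvLookup, hk]
      simp [pvSet, hk, hg, ih h']

-- index-shift facts about pvSeenInv along A's three branches
lemma pvFOH_tail_nonAD {ids : List (String × String)} {e : List (String × String)}
    {rest : List (List (String × String))}
    (h : pvSeenInv ids (e :: rest)) (he : ¬ pvGetD e "type" = "AD") :
    pvSeenInv ids rest := by
  intro i hi hAD hLook hPrev
  have := h (i + 1) (by simpa using Nat.succ_lt_succ hi)
  simp only [List.getElem_cons_succ] at this
  refine this hAD hLook ?_
  intro j hj hji
  cases j with
  | zero =>
    simp only [List.getElem_cons_zero]
    rintro ⟨hc, -⟩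
    exact he hc
  | succ j' =>
    simp only [List.getElem_cons_succ]
    exact hPrev j' (by omega) (by omega)

lemma pvFOH_tail_seen {ids : List (String × String)} {e : List (String × String)}
    {rest : List (List (String × String))} {v : String}
    (h : pvSeenInv ids (e :: rest))
    (hL : pvLookup ids (pvGetD e "name") = some v) :
    pvSeenInv ids rest := by
  intro i hi hAD hLook hPrev
  have := h (i + 1) (by simpa using Nat.succ_lt_succ hi)
  simp only [List.getElem_cons_succ] at this
  refine this hAD hLook ?_
  intro j hj hji
  cases j with
  | zero =>
    simp only [List.getElem_cons_zero]
    rintro ⟨-, hname⟩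
    rw [hname] at hL
    rw [hL] at hLook
    exact Option.some_ne_none _ hLook
  | succ j' =>
    simp only [List.getElem_cons_succ]
    exact hPrev j' (by omega) (by omega)

lemma pvFOH_tail_new {ids : List (String × String)} {e : List (String × String)}
    {rest : List (List (String × String))} (id0 : String)
    (h : pvSeenInv ids (e :: rest)) :
    pvSeenInv (ids ++ [(pvGetD e "name", id0)]) rest := by
  intro i hi hAD hLook hPrev
  have hne : ¬ pvGetD rest[i] "name" = pvGetD e "name" := by
    intro hEq
    rw [hEq] at hLook
    rw [pvLookup_append_single_self id0 ?hnone] at hLook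
    · exact Option.some_ne_none _ hLook
    case hnone =>
      cases hL' : pvLookup ids (pvGetD e "name") with
      | none => rfl
      | some v =>
        rw [pvLookup_append_some [(pvGetD e "name", id0)] hL'] at hLook
        exact absurd hLook (Option.some_ne_none _)
  have hLookIds : pvLookup ids (pvGetD rest[i] "name") = none := by
    cases hL' : pvLookup ids (pvGetD rest[i] "name") with
    | none => rfl
    | some v =>
      rw [pvLookup_append_some [(pvGetD e "name", id0)] hL'] at hLook
      exact absurd hLook (Option.some_ne_none _)
  have := h (i + 1) (by simpa using Nat.succ_lt_succ hi)
  simp only [List.getElem_cons_succ] at this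
  refine this hAD hLookIds ?_
  intro j hj hji
  cases j with
  | zero =>
    simp only [List.getElem_cons_zero]
    rintro ⟨-, hname⟩
    exact hne hname.symm
  | succ j' =>
    simp only [List.getElem_cons_succ]
    exact hPrev j' (by omega) (by omega)

lemma pvHasKey_iff_mem (e : List (String × String)) (k : String) :
    pvHasKey e k = true ↔ k ∈ e.map Prod.fst := by
  induction e with
  | nil => simp [pvHasKey, pvLookup]
  | cons p rest ih =>
    obtain ⟨k', v'⟩ := p
    by_cases hk : (k' == k)
    · have hkk : k' = k := by simpa using hk
      simp [pvHasKey, pvLookup, hkk]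
    · have hne : k ≠ k' := fun hq => by simp [hq] at hk
      simp only [pvHasKey] at ih
      simp [pvHasKey, pvLookup, hk, hne, ih]

lemma pvLookup_mem {e : List (String × String)} {k v : String}
    (h : pvLookup e k = some v) : (k, v) ∈ e := by
  induction e with
  | nil => simp [pvLookup] at h
  | cons p rest ih =>
    obtain ⟨k', v'⟩ := p
    by_cases hk : (k' == k)
    · have hkk : k' = k := by simpa using hk
      simp [pvLookup, hk] at h
      simp [hkk, h]
    · simp [pvLookup, hk] at h
      simp [ih h]

lemma pvMem_lookup {e : List (String × String)} {k v : String}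
    (hnd : (e.map Prod.fst).Nodup) (h : (k, v) ∈ e) : pvLookup e k = some v := by
  induction e with
  | nil => simp at h
  | cons p rest ih =>
    obtain ⟨k', v'⟩ := p
    simp only [List.map_cons, List.nodup_cons] at hnd
    rcases List.mem_cons.mp h with h1 | h1
    · have hkv : k = k' ∧ v = v' := by simpa [Prod.ext_iff] using h1
      simp [pvLookup, ← hkv.1, hkv.2]
    · by_cases hk : (k' == k)
      · have hkk : k' = k := by simpa using hk
        exact absurd (hkk ▸ List.mem_map_of_mem h1 : k' ∈ rest.map Prod.fst) hnd.1
      · simp [pvLookup, hk]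
        exact ih hnd.2 h1

-- the closed-form Pre_ yields the loop invariant at the empty name_ids
lemma pvPre_seenInv {program : List (List (String × String))}
    (hPre : Pre_assign_same_id_for_name program) : pvSeenInv [] program := by
  obtain ⟨h1, h2⟩ := hPre
  intro i hi hAD hLook hPrev
  obtain ⟨hnd, hty, hnm⟩ := h1 program[i] (List.getElem_mem hi)
  -- the 'type' value really is "AD"
  cases hty' : pvLookup program[i] "type" with
  | none =>
    rw [← pvHasKey_iff_mem] at hty
    simp [pvHasKey, hty'] at hty
  | some x =>
    have hx : x = "AD" := by simpa [pvGetD, hty'] using hAD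
    have hmemT : ("type", "AD") ∈ program[i] := pvLookup_mem (hx ▸ hty')
    -- the 'name' value
    have hnmk := hnm hmemT
    cases hnm' : pvLookup program[i] "name" with
    | none =>
      rw [← pvHasKey_iff_mem] at hnmk
      simp [pvHasKey, hnm'] at hnmk
    | some nm =>
      have hmemN : ("name", nm) ∈ program[i] := pvLookup_mem hnm'
      have hid := h2 i hi hmemT ("name", nm) hmemN rfl ?_
      · rw [pvHasKey_iff_mem]; exact hid
      · intro j hj hji
        rintro ⟨hTj, hNj⟩
        obtain ⟨hndj, -, -⟩ := h1 program[j] (List.getElem_mem hj)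
        refine hPrev j hj hji ⟨?_, ?_⟩
        · simp [pvGetD, pvMem_lookup hndj hTj]
        · simp [pvGetD, pvMem_lookup hndj hNj, hnm']

-- main loop correspondence: A's interleaved pass equals B's table-then-rewrite, for any name_ids seen so far
lemma pvMain (l : List (List (String × String))) (ids : List (String × String))
    (h : pvSeenInv ids l) :
    pvAssignA ids l = pvApplyTable (pvBuildTable ids l) l := by
  induction l generalizing ids with
  | nil => simp [pvAssignA, pvBuildTable, pvApplyTable]
  | cons e rest ih =>
    by_cases hT : pvGetD e "type" = "AD"
    · cases hL : pvLookup ids (pvGetD e "name") with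
      | some v =>
        have hTb : (pvGetD e "type" == "AD") = true := by simpa using hT
        have hBuild : pvBuildTable ids (e :: rest) = pvBuildTable ids rest := by
          simp [pvBuildTable, hL]
        have hGet : pvGetD (pvBuildTable ids rest) (pvGetD e "name") = v := by
          have h2 := pvLookup_buildTable rest hL
          simp only [pvGetD] at h2 ⊢
          simp [h2]
        simp only [pvAssignA, hTb, hL, pvApplyTable, List.map, hBuild, hGet, if_true]
        rw [ih ids (pvFOH_tail_seen h hL)]
        rfl
      | none =>
        have hTb : (pvGetD e "type" == "AD") = true := by simpa using hT
        have hHas : pvHasKey e "id" = true := by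
          have := h 0 (by simp) (by simpa using hT) (by simpa using hL)
          exact this (by intro j hj hji; omega)
        set ids' := ids ++ [(pvGetD e "name", pvGetD e "id")] with hids'
        have hBuild : pvBuildTable ids (e :: rest) = pvBuildTable ids' rest := by
          simp [pvBuildTable, hTb, hL, hids']
        have hGet : pvGetD (pvBuildTable ids' rest) (pvGetD e "name") = pvGetD e "id" := by
          have h1 : pvLookup ids' (pvGetD e "name") = some (pvGetD e "id") :=
            pvLookup_append_single_self _ hL
          have h2 := pvLookup_buildTable rest h1
          simp only [pvGetD] at h2 ⊢
          simp [h2]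
        simp only [pvAssignA, hTb, hL, pvApplyTable, List.map, hBuild, hGet, if_true]
        rw [pvSet_getD_self e "id" hHas]
        rw [ih ids' (pvFOH_tail_new _ h)]
        rfl
    · have hTb : (pvGetD e "type" == "AD") = false := by simpa using hT
      have hBuild : pvBuildTable ids (e :: rest) = pvBuildTable ids rest := by
        simp [pvBuildTable, hTb]
      simp only [pvAssignA, hTb, Bool.false_eq_true, if_false, pvApplyTable, List.map, hBuild]
      rw [ih ids (pvFOH_tail_nonAD h hT)]
      rfl

-- ===== VERDICT (by name: the statement is the Claim_ definition above) =====
theorem assign_same_id_for_name_spec : Claim_equal_assign_same_id_for_name := by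
  intro program _ hPre
  unfold Spec_assign_same_id_for_name assign_same_id_for_name assign_same_id_for_name_alt
  exact pvMain program [] (pvPre_seenInv hPre)
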